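-- pv_equiv track=rewrite | github.com/KevinTsai18/Programacion-1 | tp3/tp3 ej2 d.py | funcion2d
-- ===== SOURCE A (Python) =====
-- def funcion2d(cant=4):
--     n=cant
--     matriz=[]
--     for f in range(n):
--         matriz.append([])
--         for c in range(n):
--             matriz[f].append(2**(n-f-1))
--     return matriz
-- ===== SOURCE B (Python) =====
-- def funcion2d(cant=4):
--     n = cant
--     def rows(v, k):
--         # last k rows of the matrix, bottom row filled with v, doubling upward
--         if k <= 0:
--             return []
--         return rows(2 * v, k - 1) + [[v] * n]
--     return rows(1, n)
-- ===== Notes on version B (the rewrite author's own statement) =====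
-- stated objective: alternative
-- what changed: Replaces the nested append loop that exponentiates per cell with a recursive builder that constructs the matrix bottom-up (back-to-front): the last row is all ones and each recursive step doubles the accumulator, so no exponentiation and no in-place row growth occur.
import Mathlib
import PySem

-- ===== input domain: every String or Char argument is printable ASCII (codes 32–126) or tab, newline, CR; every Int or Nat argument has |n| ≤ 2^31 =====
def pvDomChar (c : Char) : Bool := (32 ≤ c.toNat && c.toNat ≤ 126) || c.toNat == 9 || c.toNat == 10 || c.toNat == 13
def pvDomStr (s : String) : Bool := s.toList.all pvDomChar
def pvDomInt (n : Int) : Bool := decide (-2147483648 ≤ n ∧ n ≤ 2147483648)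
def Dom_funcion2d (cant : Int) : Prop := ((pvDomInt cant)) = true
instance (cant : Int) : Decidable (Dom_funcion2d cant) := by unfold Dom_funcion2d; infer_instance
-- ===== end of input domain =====

-- B builds the matrix recursively bottom-up: the last row is all ones, each step doubles the
-- accumulator and puts the earlier rows (from the recursive call) in front — a different
-- decomposition (recursive, back-to-front, doubling) of the same function.

-- ===== PORT A =====
-- literal port of A's nested loops; 2**(n-f-1) is ported as 2 ^ (n-f-1).toNat, exact because
-- the exponent n-f-1 is nonnegative for every f visited by range(n)
def funcion2d (cant : Int) : List (List Int) :=
  let n := cant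
  (PySem.List.pyRange 0 n 1).foldl (fun matriz f =>
    (PySem.List.pyRange 0 n 1).foldl (fun m _c =>
      m.modify f.toNat (fun row => row ++ [2 ^ (n - f - 1).toNat])) (matriz ++ [([] : List Int)])) []

-- ===== PORT B =====
-- Source B's recursive helper rows(v, k): the last k rows, bottom row v, doubling upward
def funcion2dAltRows (n : Int) (v : Int) (k : Int) : List (List Int) :=
  if k ≤ 0 then []
  else funcion2dAltRows n (2 * v) (k - 1) ++ [List.replicate n.toNat v]
termination_by k.toNat
decreasing_by omega

def funcion2d_alt (cant : Int) : List (List Int) :=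
  let n := cant
  funcion2dAltRows n 1 n

-- ===== PRECONDITION & SPEC =====
def Spec_funcion2d (cant : Int) (out : List (List Int)) : Prop := out = funcion2d_alt cant
instance (cant : Int) (out : List (List Int)) : Decidable (Spec_funcion2d cant out) := by unfold Spec_funcion2d; infer_instance

-- ===== CLAIM (what is proved, stated in full; the proofs are below) =====
def Claim_equal_funcion2d : Prop := ∀ (cant : Int), Dom_funcion2d cant → Spec_funcion2d cant (funcion2d cant)

-- ===== LEMMAS AND PROOFS =====

-- modifying the last slot of acc ++ [l]
theorem modify_append_last (acc : List (List Int)) (l : List Int) (g : List Int → List Int) :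
    (acc ++ [l]).modify acc.length g = acc ++ [g l] := by
  induction acc with
  | nil => simp [List.modify]
  | cons a t ih =>
      simp only [List.cons_append, List.length_cons, List.modify_succ_cons, ih]

-- inner loop of A: each of the cs-many steps appends v to the row at the last position
theorem inner_loop (cs : List Int) (acc : List (List Int)) (l : List Int) (v : Int) :
    cs.foldl (fun m _c => m.modify acc.length (fun row => row ++ [v])) (acc ++ [l])
      = acc ++ [l ++ List.replicate cs.length v] := by
  induction cs generalizing l with
  | nil => simp
  | cons c t ih =>
      simp only [List.foldl_cons, modify_append_last]
      rw [ih (l ++ [v])]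
      simp [List.replicate_succ]

-- outer loop of A over the row indices j, j+1, …, j+r-1 (as Ints), acc already holding j rows
theorem outer_loop (n : Int) (cs : List Int) (r j : Nat) (acc : List (List Int)) (hlen : acc.length = j) :
    ((List.range' j r).map (Int.ofNat)).foldl
        (fun matriz f =>
          cs.foldl (fun m _c =>
            m.modify f.toNat (fun row => row ++ [2 ^ (n - f - 1).toNat])) (matriz ++ [[]])) acc
      = acc ++ (List.range' j r).map (fun f => List.replicate cs.length (2 ^ (n - (f : Int) - 1).toNat)) := by
  induction r generalizing j acc with
  | zero => simp
  | succ r ih =>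
      rw [List.range'_succ]
      simp only [List.map_cons, List.foldl_cons]
      have h1 : ((Int.ofNat j).toNat) = acc.length := by simp [hlen]
      rw [h1, inner_loop cs acc [] (2 ^ (n - (Int.ofNat j) - 1).toNat)]
      rw [ih (j + 1) _ (by simp [hlen])]
      simp

-- A in closed form
theorem funcion2d_closed (cant : Int) :
    funcion2d cant
      = (List.range cant.toNat).map
          (fun f : Nat => List.replicate cant.toNat (2 ^ (cant - Int.ofNat f - 1).toNat)) := by
  show (PySem.List.pyRange 0 cant 1).foldl _ [] = _
  have hr : PySem.List.pyRange 0 cant 1 = (List.range' 0 cant.toNat).map (Int.ofNat) := by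
    rw [PySem.List.pyRange_one]
    simp [List.range_eq_range']
  rw [hr, outer_loop cant ((List.range' 0 cant.toNat).map (Int.ofNat)) cant.toNat 0 [] rfl,
      List.range_eq_range']
  simp only [List.nil_append, List.length_map, List.length_range']
  rw [show (do let a ← List.range' 0 cant.toNat; pure ((a : Nat) : Int) : List Int)
        = (List.range' 0 cant.toNat).map Int.ofNat from by
      induction List.range' 0 cant.toNat with
      | nil => rfl
      | cons a t ih => simpa using ih]
  rw [List.map_map]
  rfl

-- B's recursive builder in closed form (k as a Nat counts the rows)
theorem rows_closed (n v : Int) (k : Nat) :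
    funcion2dAltRows n v (k : Nat) =
      (List.range k).map (fun i => List.replicate n.toNat (v * 2 ^ (k - 1 - i))) := by
  induction k generalizing v with
  | zero => rw [funcion2dAltRows]; simp
  | succ k ih =>
      rw [funcion2dAltRows]
      rw [if_neg (by omega)]
      have hk : ((k : Nat) : Int) + 1 - 1 = (k : Nat) := by omega
      rw [show ((k + 1 : Nat) : Int) - 1 = ((k : Nat) : Int) by push_cast; ring]
      rw [ih (2 * v)]
      rw [List.range_succ]
      simp only [List.map_append, List.map_cons, List.map_nil]
      congr 1
      · apply List.map_congr_left
        intro i hi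
        simp only [List.mem_range] at hi
        congr 1
        have : k + 1 - 1 - i = (k - 1 - i) + 1 := by omega
        rw [this, pow_succ]
        ring
      · congr 2
        simp

-- ===== VERDICT (by name: the statement is the Claim_ definition above) =====
theorem funcion2d_spec : Claim_equal_funcion2d := by
  intro cant _
  show funcion2d cant = funcion2d_alt cant
  rw [funcion2d_closed]
  unfold funcion2d_alt
  by_cases h : 0 < cant
  · have hc : cant = ((cant.toNat : Nat) : Int) := by omega
    rw [show funcion2dAltRows cant 1 cant = funcion2dAltRows cant 1 (cant.toNat : Nat) by rw [← hc]]
    rw [rows_closed]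
    apply List.map_congr_left
    intro f hf
    simp only [List.mem_range] at hf
    congr 1
    have : (cant - Int.ofNat f - 1).toNat = cant.toNat - 1 - f := by
      rw [show Int.ofNat f = (f : Int) from rfl]; omega
    rw [this, one_mul]
  · rw [funcion2dAltRows, if_pos (by omega)]
    have : cant.toNat = 0 := by omega
    simp [this]
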